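-- pv_equiv track=rewrite | github.com/UberM1/bingo | src/bingo.py | completos_segui2
-- ===== SOURCE A (Python) =====
-- def completos_segui2(mi_carton):
--     count = 0
--     for fila in mi_carton:
--         count = 0
--         for celda in fila:
--             if(celda != 0):
--                 count += 1
--             if(celda == 0):
--                 count = 0
--             if(count > 2):
--                 return False
--     if count > 2:
--         return False
--     else:
--         return True
-- ===== SOURCE B (Python) =====
-- def completos_segui2(mi_carton):
--     for fila in mi_carton:
--         if not all(a == 0 or b == 0 or c == 0
--                    for a, b, c in zip(fila, fila[1:], fila[2:])):
--             return False
--     return True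
-- ===== Notes on version B (the rewrite author's own statement) =====
-- stated objective: idiomatic
-- what changed: Replaces A's running counter of consecutive non-zero cells (with early return and a leftover final check) by a per-row sliding-window test via zip over the row and its two shifts, requiring some zero in every length-3 window.
import Mathlib
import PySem

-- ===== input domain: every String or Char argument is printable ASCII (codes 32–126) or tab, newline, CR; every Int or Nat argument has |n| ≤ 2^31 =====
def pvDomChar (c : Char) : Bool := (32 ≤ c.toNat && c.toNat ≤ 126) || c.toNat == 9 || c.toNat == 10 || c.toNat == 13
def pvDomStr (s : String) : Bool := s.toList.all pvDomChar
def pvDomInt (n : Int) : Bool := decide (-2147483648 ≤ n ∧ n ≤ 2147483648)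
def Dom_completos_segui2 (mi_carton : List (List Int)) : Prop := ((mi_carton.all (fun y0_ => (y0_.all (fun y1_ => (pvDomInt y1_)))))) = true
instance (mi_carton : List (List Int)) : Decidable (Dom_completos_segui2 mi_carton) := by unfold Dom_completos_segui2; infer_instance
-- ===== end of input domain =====

-- B replaces A's running counter of consecutive non-zero cells (with early return)
-- by a per-row sliding-window check over zipped shifts of the row (idiomatic; same cost).

-- ===== PORT A =====
-- inner loop: the three ifs in order; `none` = the early `return False`
def pvLoopRowA (count : Int) : List Int → Option Int
  | [] => some count
  | celda :: rest =>
      let count := if celda ≠ 0 then count + 1 else count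
      let count := if celda = 0 then 0 else count
      if count > 2 then none else pvLoopRowA count rest

-- outer loop: carries `count` between rows (each row resets it to 0), then the final check
def pvLoopRowsA (count : Int) : List (List Int) → Bool
  | [] => if count > 2 then false else true
  | fila :: rest =>
      match pvLoopRowA 0 fila with
      | none => false
      | some c => pvLoopRowsA c rest

def completos_segui2 (mi_carton : List (List Int)) : Bool := pvLoopRowsA 0 mi_carton

-- ===== PORT B =====
-- fila[1:] / fila[2:] with nonnegative bounds are exactly List.drop 1 / List.drop 2
def pvRowOkB (fila : List Int) : Bool :=
  ((fila.zip (fila.drop 1)).zip (fila.drop 2)).all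
    (fun p => p.1.1 == 0 || p.1.2 == 0 || p.2 == 0)

def completos_segui2_alt (mi_carton : List (List Int)) : Bool := mi_carton.all pvRowOkB

-- ===== PRECONDITION & SPEC =====
def Spec_completos_segui2 (mi_carton : List (List Int)) (out : Bool) : Prop := out = completos_segui2_alt mi_carton
instance (mi_carton : List (List Int)) (out : Bool) : Decidable (Spec_completos_segui2 mi_carton out) := by unfold Spec_completos_segui2; infer_instance

-- ===== CLAIM (what is proved, stated in full; the proofs are below) =====
def Claim_equal_completos_segui2 : Prop := ∀ (mi_carton : List (List Int)), Dom_completos_segui2 mi_carton → Spec_completos_segui2 mi_carton (completos_segui2 mi_carton)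

-- ===== LEMMAS AND PROOFS =====

-- "leading run of non-zero cells has length ≥ k"
def pvRunGE : Nat → List Int → Bool
  | 0, _ => true
  | _ + 1, [] => false
  | k + 1, x :: r => (x != 0) && pvRunGE k r

theorem pvRunGE_mono {k k' : Nat} (h : k ≤ k') (r : List Int) :
    pvRunGE k' r = true → pvRunGE k r = true := by
  induction r generalizing k k' with
  | nil =>
      cases k with
      | zero => simp [pvRunGE]
      | succ n => cases k' with
        | zero => omega
        | succ m => simp [pvRunGE]
  | cons x r ih =>
      cases k with
      | zero => simp [pvRunGE]
      | succ n => cases k' with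
        | zero => omega
        | succ m =>
          simp only [pvRunGE, Bool.and_eq_true]
          exact fun ⟨hx, hr⟩ => ⟨hx, ih (by omega) hr⟩

theorem pvRowOkB_cons (x : Int) (r : List Int) :
    pvRowOkB (x :: r) = (!(x != 0 && pvRunGE 2 r) && pvRowOkB r) := by
  match r with
  | [] => simp [pvRowOkB, pvRunGE]
  | [b] => simp [pvRowOkB, pvRunGE]
  | b :: c :: t =>
      simp only [pvRowOkB, pvRunGE, List.drop, List.zip_cons_cons, List.all_cons]
      cases hx : x == 0 <;> cases hb : b == 0 <;> cases hc : c == 0 <;>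
        simp_all [bne]

theorem pvRunGE3_rowOkB (r : List Int) (h : pvRunGE 3 r = true) : pvRowOkB r = false := by
  match r with
  | [] => simp [pvRunGE] at h
  | [a] => simp [pvRunGE] at h
  | [a, b] => simp [pvRunGE] at h
  | a :: b :: c :: t =>
      simp only [pvRunGE, Bool.and_eq_true] at h
      simp only [pvRowOkB, List.drop, List.zip_cons_cons, List.all_cons]
      obtain ⟨ha, hb, hc, -⟩ := h
      simp_all [bne]

theorem pvRunGE3_false (r : List Int) (hb : pvRowOkB r = true) : pvRunGE 3 r = false := by
  cases h3 : pvRunGE 3 r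
  · rfl
  · rw [pvRunGE3_rowOkB r h3] at hb; simp at hb

-- the inner loop fails iff the row has a bad window or the carried count completes a run
theorem pvLoopRowA_none (fila : List Int) : ∀ (c : Int), 0 ≤ c → c ≤ 2 →
    ((pvLoopRowA c fila).isNone = (!pvRowOkB fila || pvRunGE (3 - c).toNat fila)) := by
  induction fila with
  | nil =>
      intro c h0 h2
      have hk : (3 - c).toNat = (3 - c).toNat - 1 + 1 := by omega
      rw [hk]
      simp [pvLoopRowA, pvRowOkB, pvRunGE]
  | cons x r ih =>
      intro c h0 h2
      by_cases hx : x = 0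
      · have e : pvLoopRowA c (x :: r) = pvLoopRowA 0 r := by simp [pvLoopRowA, hx]
        have hxb : (x == 0) = true := by simp [hx]
        rw [e, ih 0 (by omega) (by omega), pvRowOkB_cons]
        have hk : (3 - c).toNat = (3 - c).toNat - 1 + 1 := by omega
        rw [hk]
        simp only [pvRunGE, bne, hxb, Bool.not_true, Bool.false_and, Bool.not_false,
          Bool.true_and, Bool.or_false]
        cases hb : pvRowOkB r
        · simp
        · simp [pvRunGE3_false r hb]
      · have hxb : (x == 0) = false := by simp [hx]
        have e : pvLoopRowA c (x :: r) = if c + 1 > 2 then none else pvLoopRowA (c + 1) r := by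
          simp [pvLoopRowA, hx]
        rw [e]
        by_cases hc2 : c + 1 > 2
        · rw [if_pos hc2]
          have hc : c = 2 := by omega
          subst hc
          rw [pvRowOkB_cons]
          have hk : ((3 : Int) - 2).toNat = 1 := by decide
          simp [pvRunGE, bne, hxb]
        · rw [if_neg hc2, ih (c + 1) (by omega) (by omega), pvRowOkB_cons]
          have hk : (3 - c).toNat = (3 - (c + 1)).toNat + 1 := by omega
          rw [hk]
          simp only [pvRunGE, bne, hxb, Bool.not_false, Bool.true_and, Bool.not_and,
            Bool.not_not, Bool.or_assoc]
          cases h2r : pvRunGE 2 r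
          · simp
          · have hkr : pvRunGE (3 - (c + 1)).toNat r = true :=
              pvRunGE_mono (by omega) r h2r
            simp [hkr]

theorem pvLoopRowA_some (fila : List Int) : ∀ (c c' : Int), 0 ≤ c → c ≤ 2 →
    pvLoopRowA c fila = some c' → 0 ≤ c' ∧ c' ≤ 2 := by
  induction fila with
  | nil => intro c c' h0 h2 h; simp [pvLoopRowA] at h; omega
  | cons x r ih =>
      intro c c' h0 h2 h
      by_cases hx : x = 0
      · have e : pvLoopRowA c (x :: r) = pvLoopRowA 0 r := by simp [pvLoopRowA, hx]
        rw [e] at h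
        exact ih 0 c' (by omega) (by omega) h
      · have e : pvLoopRowA c (x :: r) = if c + 1 > 2 then none else pvLoopRowA (c + 1) r := by
          simp [pvLoopRowA, hx]
        rw [e] at h
        by_cases hc2 : c + 1 > 2
        · rw [if_pos hc2] at h; exact absurd h (by simp)
        · rw [if_neg hc2] at h
          exact ih (c + 1) c' (by omega) (by omega) h

theorem pvLoopRowsA_eq (rows : List (List Int)) : ∀ (c : Int), 0 ≤ c → c ≤ 2 →
    pvLoopRowsA c rows = rows.all pvRowOkB := by
  induction rows with
  | nil => intro c h0 h2; simp [pvLoopRowsA]; omega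
  | cons fila rest ih =>
      intro c h0 h2
      simp only [pvLoopRowsA, List.all_cons]
      have hrow := pvLoopRowA_none fila 0 (by omega) (by omega)
      cases h : pvLoopRowA 0 fila with
      | none =>
          rw [h] at hrow
          simp only [Option.isNone_none] at hrow
          have hok : pvRowOkB fila = false := by
            by_contra hb
            simp only [Bool.not_eq_false] at hb
            have := pvRunGE3_false fila hb
            simp [hb, this] at hrow
          simp [hok]
      | some c' =>
          rw [h] at hrow
          simp only [Option.isNone_some] at hrow
          have hok : pvRowOkB fila = true := by
            cases hb : pvRowOkB fila
            · simp [hb] at hrow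
            · rfl
          obtain ⟨hc0, hc2⟩ := pvLoopRowA_some fila 0 c' (by omega) (by omega) h
          simp [hok, ih c' hc0 hc2]

-- ===== VERDICT (by name: the statement is the Claim_ definition above) =====
theorem completos_segui2_spec : Claim_equal_completos_segui2 := by
  intro mi_carton _
  show completos_segui2 mi_carton = completos_segui2_alt mi_carton
  unfold completos_segui2 completos_segui2_alt
  exact pvLoopRowsA_eq mi_carton 0 (by omega) (by omega)
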